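-- pv_equiv track=rewrite | github.com/Haksell/codeforces | problems/2066B.py | naive
-- ===== SOURCE A (Python) =====
-- from itertools import combinations, count
--
-- def mex(a):
--     s = set(a)
--     return next(i for i in count() if i not in s)
--
-- def naive_is_magical(a):
--     for i in range(1, len(a)):
--         left = a[:i]
--         right = a[i:]
--         if min(left) < mex(right):
--             return False
--     return True
--
-- def naive(n, a):
--     res = 0
--     for r in range(1, n + 1):
--         for comb in combinations(range(n), r=r):
--             ss = [a[i] for i in comb]
--             if naive_is_magical(ss):
--                 res = r
--                 break
--     return res
-- ===== SOURCE B (Python) =====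
-- # Polynomial re-implementation: a magical subsequence consists of positive
-- # elements, plus at most one zero, plus at most one negative (which must come
-- # last); so only a few canonical candidates need to be checked.
-- def mex2(s):
--     m = 0
--     for x in sorted(s):
--         if x == m:
--             m += 1
--     return m
--
-- def zero_ok(pre, z, j):
--     # Is the candidate "positives of pre[:j], keeping the zero at index z,
--     # optionally followed by one negative" magical?  Only the splits with the
--     # zero on the right are non-trivial.
--     p = [x for x in pre[:j] if x > 0]
--     k = len([x for x in pre[:z] if x > 0])
--     lo = None
--     for i in range(k):
--         if lo is None or p[i] < lo:
--             lo = p[i]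
--         if lo < mex2(p[i + 1:] + [0]):
--             return False
--     return True
--
-- def naive(n, a):
--     pre = a[:n] if n > 0 else []
--     P = len([x for x in pre if x > 0])
--     best = P  # all positive elements always form a magical subsequence
--     for j in range(len(pre)):
--         if pre[j] < 0:  # positives before j, then this negative: always magical
--             b = len([x for x in pre[:j] if x > 0]) + 1
--             if b > best:
--                 best = b
--     for z in range(len(pre)):
--         if pre[z] == 0:
--             if zero_ok(pre, z, len(pre)) and P + 1 > best:
--                 best = P + 1
--             for j in range(z + 1, len(pre)):
--                 if pre[j] < 0 and zero_ok(pre, z, j):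
--                     b = len([x for x in pre[:j] if x > 0]) + 2
--                     if b > best:
--                         best = b
--     return best
-- ===== Notes on version B (the rewrite author's own statement) =====
-- stated objective: faster
-- what changed: A enumerates every subsequence of every size and tests each for magicality; B uses a structural characterization (a magical subsequence is positives + at most one zero + at most one trailing negative) and checks only the few canonical candidates in polynomial time; intended as faster (asymptotic): timing runs saw A hundreds of times slower or timing out at n>=64 where B returned instantly, though the harness could not certify the ratio.
import Mathlib
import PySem

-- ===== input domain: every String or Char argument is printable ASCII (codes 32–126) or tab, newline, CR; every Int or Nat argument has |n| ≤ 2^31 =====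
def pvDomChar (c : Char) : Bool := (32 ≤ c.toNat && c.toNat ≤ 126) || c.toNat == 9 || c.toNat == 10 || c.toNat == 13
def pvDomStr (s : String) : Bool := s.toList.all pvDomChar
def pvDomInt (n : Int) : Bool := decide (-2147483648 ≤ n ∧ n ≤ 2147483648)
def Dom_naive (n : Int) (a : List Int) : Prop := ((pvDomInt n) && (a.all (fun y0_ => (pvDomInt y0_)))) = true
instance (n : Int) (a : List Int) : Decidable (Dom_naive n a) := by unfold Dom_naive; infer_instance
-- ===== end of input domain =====

-- B replaces A's exponential scan of all subsequences by a polynomial candidate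
-- search derived from the structure of magical subsequences (objective: faster, intended as
-- asymptotic; timing runs saw A time out at n >= 64..256 where B returned at once,
-- though the harness could not certify a ratio).

-- ===== PORT A =====
def mexAux (s : List Int) (i : Int) : Nat → Int
  | 0 => i
  | fuel + 1 => if i ∈ s then mexAux s (i + 1) fuel else i

-- mex(a): s = set(a); next(i for i in count() if i not in s)
def mexA (l : List Int) : Int :=
  let s := PySem.Set.ofList l
  mexAux s 0 (s.length + 1)

def naiveIsMagical (l : List Int) : Bool :=
  (PySem.List.pyRange 1 (l.length : Int) 1).all fun i =>
    let left := PySem.List.slice l none (some i)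
    let right := PySem.List.slice l (some i) none
    !decide ((PySem.List.min? left (fun x => x)).getD 0 < mexA right)

def naive (n : Int) (a : List Int) : Int :=
  (PySem.List.pyRange 1 (n + 1) 1).foldl (fun res r =>
    if (PySem.List.combinations (PySem.List.pyRange 0 n 1) r.toNat).any
        (fun comb => naiveIsMagical (comb.map (fun i => PySem.List.pyGetD a i 0))) then r
    else res) 0

-- ===== PORT B =====
def mex2 (s : List Int) : Int :=
  (PySem.List.sorted s (fun x => x) false).foldl (fun m x => if x = m then m + 1 else m) 0

def zeroOk (pre : List Int) (z : Int) (j : Int) : Bool :=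
  let p := (PySem.List.slice pre none (some j)).filter (fun x => decide (0 < x))
  let k := ((PySem.List.slice pre none (some z)).filter (fun x => decide (0 < x))).length
  ((PySem.List.pyRange 0 (k : Int) 1).foldl (fun (st : Option Int × Bool) i =>
      let lo := match st.1 with
        | none => PySem.List.pyGetD p i 0
        | some lo => if PySem.List.pyGetD p i 0 < lo then PySem.List.pyGetD p i 0 else lo
      (some lo, st.2 && !decide (lo < mex2 (PySem.List.slice p (some (i + 1)) none ++ [0]))))
    (none, true)).2

def naive_alt (n : Int) (a : List Int) : Int :=
  let pre := if 0 < n then PySem.List.slice a none (some n) else []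
  let P : Int := ((pre.filter (fun x => decide (0 < x))).length : Int)
  let best := P
  let best := (PySem.List.pyRange 0 (pre.length : Int) 1).foldl (fun best j =>
      if PySem.List.pyGetD pre j 0 < 0 then
        let b := (((PySem.List.slice pre none (some j)).filter (fun x => decide (0 < x))).length : Int) + 1
        if b > best then b else best
      else best) best
  (PySem.List.pyRange 0 (pre.length : Int) 1).foldl (fun best z =>
      if PySem.List.pyGetD pre z 0 = 0 then
        let best := if zeroOk pre z (pre.length : Int) && decide (P + 1 > best) then P + 1 else best
        (PySem.List.pyRange (z + 1) (pre.length : Int) 1).foldl (fun best j =>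
            if PySem.List.pyGetD pre j 0 < 0 && zeroOk pre z j then
              let b := (((PySem.List.slice pre none (some j)).filter (fun x => decide (0 < x))).length : Int) + 2
              if b > best then b else best
            else best) best
      else best) best

-- ===== PRECONDITION & SPEC =====
-- A indexes a[i] for i in range(n): it raises IndexError when n > len(a); exactly those inputs are excluded.
def Pre_naive (n : Int) (a : List Int) : Prop := n ≤ (a.length : Int)
instance (n : Int) (a : List Int) : Decidable (Pre_naive n a) := by unfold Pre_naive; infer_instance

def pvWitness_naive : Int × List Int := (3, [1, 0, 2])

def Spec_naive (n : Int) (a : List Int) (out : Int) : Prop := out = naive_alt n a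
instance (n : Int) (a : List Int) (out : Int) : Decidable (Spec_naive n a out) := by unfold Spec_naive; infer_instance

-- ===== CLAIM (what is proved, stated in full; the proofs are below) =====
def Claim_equal_naive : Prop := ∀ (n : Int) (a : List Int), Dom_naive n a → Pre_naive n a → Spec_naive n a (naive n a)
-- ===== LEMMAS AND PROOFS =====

-- the minimum of a list, 0 if empty (both running minima reduce to this)
def Mn (l : List Int) : Int := (PySem.List.min? l (fun x => x)).getD 0

-- "v is the mex of l"
def IsMex (l : List Int) (v : Int) : Prop :=
  0 ≤ v ∧ v ∉ l ∧ ∀ t : Int, 0 ≤ t → t < v → t ∈ l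

-- positives of l
def posf (l : List Int) : List Int := l.filter (fun x => decide (0 < x))

-- "some magical sublist of pre has length r"
def Ex (pre : List Int) (r : Int) : Prop :=
  ∃ s : List Int, s.Sublist pre ∧ naiveIsMagical s = true ∧ (s.length : Int) = r

def czand (pre : List Int) (z j : Nat) : List Int :=
  posf (pre.take z) ++ 0 :: posf ((pre.take j).drop (z + 1))


theorem isMex_unique {l : List Int} {u v : Int} (hu : IsMex l u) (hv : IsMex l v) : u = v := by
  obtain ⟨hu0, hu1, hu2⟩ := hu; obtain ⟨hv0, hv1, hv2⟩ := hv
  by_contra hne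
  rcases lt_or_gt_of_ne hne with h | h
  · exact hu1 (hv2 u hu0 h)
  · exact hv1 (hu2 v hv0 h)

theorem isMex_congr {l l' : List Int} {v : Int}
    (h : ∀ t : Int, 0 ≤ t → (t ∈ l ↔ t ∈ l')) (hv : IsMex l v) : IsMex l' v := by
  obtain ⟨h0, h1, h2⟩ := hv
  exact ⟨h0, fun hm => h1 ((h v h0).mpr hm), fun t ht htv => (h t ht).mp (h2 t ht htv)⟩

theorem mexAux_spec (s : List Int) (fuel : Nat) : ∀ (i : Int), 0 ≤ i →
    (∀ t : Int, 0 ≤ t → t < i → t ∈ s) →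
    (∃ j : Int, i ≤ j ∧ j < i + fuel ∧ j ∉ s) →
    IsMex s (mexAux s i fuel) := by
  induction fuel with
  | zero =>
    intro i _ _ hex
    obtain ⟨j, hj1, hj2, _⟩ := hex
    omega
  | succ fuel ih =>
    intro i hi hbelow hex
    unfold mexAux
    split
    · rename_i hmem
      apply ih (i + 1) (by omega)
      · intro t ht hti
        rcases eq_or_lt_of_le (show t ≤ i by omega) with h | h
        · exact h ▸ hmem
        · exact hbelow t ht (by omega)
      · obtain ⟨j, hj1, hj2, hj3⟩ := hex
        have : j ≠ i := fun h => hj3 (h ▸ hmem)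
        exact ⟨j, by omega, by push_cast; omega, hj3⟩
    · rename_i hmem
      exact ⟨hi, hmem, hbelow⟩

theorem pigeonhole_int (s : List Int) (hnd : s.Nodup) :
    ∃ j : Int, 0 ≤ j ∧ j < (s.length : Int) + 1 ∧ j ∉ s := by
  by_contra hall
  push_neg at hall
  have hsub : (PySem.List.pyRange 0 ((s.length : Int) + 1) 1) ⊆ s := by
    intro x hx
    rw [PySem.List.mem_pyRange_one] at hx
    exact hall x hx.1 hx.2
  have hnd2 := PySem.List.nodup_pyRange_one (a := 0) (b := (s.length : Int) + 1)
  have hlen : (PySem.List.pyRange 0 ((s.length : Int) + 1) 1).length = s.length + 1 := by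
    rw [PySem.List.length_pyRange_one]; omega
  have hle : (PySem.List.pyRange 0 ((s.length : Int) + 1) 1).length ≤ s.length := by
    have h1 := List.toFinset_card_of_nodup hnd2
    have h2 := List.toFinset_card_of_nodup hnd
    have h3 : (PySem.List.pyRange 0 ((s.length : Int) + 1) 1).toFinset ⊆ s.toFinset := by
      intro x hx; simp only [List.mem_toFinset] at *; exact hsub hx
    have := Finset.card_le_card h3
    omega
  omega

theorem mexA_isMex (l : List Int) : IsMex l (mexA l) := by
  unfold mexA
  have hnd := PySem.Set.nodup_ofList (xs := l)
  have hmem : ∀ t : Int, t ∈ PySem.Set.ofList l ↔ t ∈ l := fun t => PySem.Set.mem_ofList _ _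
  apply isMex_congr (l := PySem.Set.ofList l)
  · intro t _; exact hmem t
  · apply mexAux_spec _ _ 0 le_rfl (by intro t ht h0; omega)
    obtain ⟨j, hj0, hj1, hj2⟩ := pigeonhole_int (PySem.Set.ofList l) hnd
    exact ⟨j, hj0, by push_cast; omega, hj2⟩

-- sorted scan
theorem scan_const (l : List Int) (m : Int) (h : ∀ y ∈ l, m < y) :
    l.foldl (fun m x => if x = m then m + 1 else m) m = m := by
  induction l with
  | nil => rfl
  | cons x t ih =>
    simp only [List.foldl_cons]
    have hx := h x (by simp)
    rw [if_neg (by omega)]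
    exact ih (fun y hy => h y (by simp [hy]))

theorem scan_spec (l : List Int) : ∀ m : Int, l.Pairwise (· ≤ ·) →
    m ≤ l.foldl (fun m x => if x = m then m + 1 else m) m ∧
    l.foldl (fun m x => if x = m then m + 1 else m) m ∉ l ∧
    ∀ v : Int, m ≤ v → v < l.foldl (fun m x => if x = m then m + 1 else m) m → v ∈ l := by
  induction l with
  | nil => intro m _; simp
  | cons x t ih =>
    intro m hp
    have hxt : ∀ y ∈ t, x ≤ y := (List.pairwise_cons.mp hp).1
    have hpt : t.Pairwise (· ≤ ·) := (List.pairwise_cons.mp hp).2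
    simp only [List.foldl_cons]
    by_cases hxm : x = m
    · rw [if_pos hxm]
      obtain ⟨h1, h2, h3⟩ := ih (m + 1) hpt
      refine ⟨by omega, ?_, ?_⟩
      · simp only [List.mem_cons, not_or]
        exact ⟨by omega, h2⟩
      · intro v hv1 hv2
        rcases eq_or_lt_of_le hv1 with h | h
        · simp [← h, hxm]
        · simp [h3 v (by omega) hv2]
    · rw [if_neg hxm]
      rcases lt_or_gt_of_ne hxm with hlt | hgt
      · obtain ⟨h1, h2, h3⟩ := ih m hpt
        refine ⟨h1, ?_, ?_⟩
        · simp only [List.mem_cons, not_or]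
          exact ⟨by omega, h2⟩
        · intro v hv1 hv2; simp [h3 v hv1 hv2]
      · rw [scan_const t m (fun y hy => lt_of_lt_of_le hgt (hxt y hy))]
        refine ⟨le_rfl, ?_, by omega⟩
        simp only [List.mem_cons, not_or]
        constructor
        · omega
        · intro hm
          exact absurd (hxt m hm) (by omega)

theorem mex2_isMex (l : List Int) : IsMex l (mex2 l) := by
  have hp : (PySem.List.sorted l (fun x => x) false).Pairwise (· ≤ ·) := by
    have := PySem.List.sorted_pairwise (xs := l) (key := fun x : Int => x)
    simpa using this
  have hmem : ∀ t : Int, t ∈ PySem.List.sorted l (fun x => x) false ↔ t ∈ l := by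
    intro t; exact PySem.List.mem_sorted l (fun x : Int => x) false t
  obtain ⟨h1, h2, h3⟩ := scan_spec (PySem.List.sorted l (fun x => x) false) 0 hp
  refine ⟨h1, fun h => h2 ((hmem _).mpr h), fun t ht htv => (hmem t).mp (h3 t ht htv)⟩

theorem Mn_mem {l : List Int} (h : l ≠ []) : Mn l ∈ l := by
  unfold Mn
  rcases ho : PySem.List.min? l (fun x => x) with _ | m
  · exact absurd ((PySem.List.min?_eq_none_iff _ _).mp ho) h
  · simpa using PySem.List.min?_mem ho

theorem Mn_le {l : List Int} {x : Int} (hx : x ∈ l) : Mn l ≤ x := by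
  unfold Mn
  rcases ho : PySem.List.min? l (fun x => x) with _ | m
  · rw [(PySem.List.min?_eq_none_iff _ _).mp ho] at hx; simp at hx
  · simpa using PySem.List.min?_isMin ho x hx

theorem Mn_ge {l : List Int} {c : Int} (h : ∀ x ∈ l, c ≤ x) (hne : l ≠ []) : c ≤ Mn l :=
  h _ (Mn_mem hne)

theorem magical_iff (s : List Int) :
    naiveIsMagical s = true ↔ ∀ i : Nat, 1 ≤ i → i < s.length →
      ¬ (Mn (s.take i) < mexA (s.drop i)) := by
  unfold naiveIsMagical
  rw [List.all_eq_true]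
  constructor
  · intro h i h1 hl
    have hi := h (i : Int) (by rw [PySem.List.mem_pyRange_one]; push_cast; omega)
    simp only [PySem.List.slice_to s (by omega : (0:Int) ≤ (i : Int)),
      PySem.List.slice_from s (by omega : (0:Int) ≤ (i : Int)), Int.toNat_natCast] at hi
    simpa [Mn, not_lt] using hi
  · intro h x hx
    rw [PySem.List.mem_pyRange_one] at hx
    simp only [PySem.List.slice_to s (by omega : (0:Int) ≤ x),
      PySem.List.slice_from s (by omega : (0:Int) ≤ x)]
    have := h x.toNat (by omega) (by omega)
    simpa [Mn, not_lt] using this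

theorem map_getD_range_take (a : List Int) (n : Int) (h0 : 0 ≤ n) (h1 : n ≤ (a.length : Int)) :
    (PySem.List.pyRange 0 n 1).map (fun i => PySem.List.pyGetD a i 0) = a.take n.toNat := by
  apply List.ext_getElem
  · simp [PySem.List.length_pyRange_one]; omega
  · intro k hk1 hk2
    have hkn : k < n.toNat := by
      simp [PySem.List.length_pyRange_one] at hk1; omega
    have hka : k < a.length := by omega
    simp only [List.getElem_map, PySem.List.getElem_pyRange_one, List.getElem_take]
    have : (0 : Int) + (k : Int) = (k : Int) := by omega
    rw [this, PySem.List.pyGetD_natCast]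
    exact List.getD_eq_getElem a 0 hka

theorem any_comb (a : List Int) (n r : Int) (h0 : 0 ≤ n) (h1 : n ≤ (a.length : Int)) (hr : 1 ≤ r) :
    ((PySem.List.combinations (PySem.List.pyRange 0 n 1) r.toNat).any
        (fun comb => naiveIsMagical (comb.map (fun i => PySem.List.pyGetD a i 0))) = true)
      ↔ Ex (a.take n.toNat) r := by
  rw [List.any_eq_true]
  constructor
  · rintro ⟨c, hc, hmag⟩
    refine ⟨c.map (fun i => PySem.List.pyGetD a i 0), ?_, hmag, ?_⟩
    · have : (c.map (fun i => PySem.List.pyGetD a i 0)) ∈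
          PySem.List.combinations (a.take n.toNat) r.toNat := by
        rw [← map_getD_range_take a n h0 h1, PySem.List.combinations_map]
        exact List.mem_map_of_mem hc
      exact ((PySem.List.mem_combinations_iff _ _ _).mp this).1
    · have := ((PySem.List.mem_combinations_iff _ _ _).mp hc).2
      simp [this]; omega
  · rintro ⟨s, hsub, hmag, hlen⟩
    have hmem : s ∈ PySem.List.combinations (a.take n.toNat) r.toNat := by
      rw [PySem.List.mem_combinations_iff]
      exact ⟨hsub, by omega⟩
    rw [← map_getD_range_take a n h0 h1, PySem.List.combinations_map] at hmem
    obtain ⟨c, hc, hceq⟩ := List.mem_map.mp hmem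
    exact ⟨c, hc, by rw [hceq]; exact hmag⟩

theorem foldl_lastpick_none (p : Int → Bool) (L : List Int) (init : Int)
    (h : ∀ r ∈ L, p r = false) :
    L.foldl (fun res r => if p r then r else res) init = init := by
  induction L generalizing init with
  | nil => rfl
  | cons x t ih =>
    simp only [List.foldl_cons, h x (by simp)]
    simpa using ih init (fun r hr => h r (by simp [hr]))

theorem foldl_lastpick (p : Int → Bool) (a b B init : Int)
    (h1 : a ≤ B) (h2 : B < b) (h3 : p B = true)
    (h4 : ∀ r : Int, B < r → r < b → p r = false) :
    (PySem.List.pyRange a b 1).foldl (fun res r => if p r then r else res) init = B := by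
  rw [PySem.List.pyRange_one_append a (B + 1) b (by omega) (by omega), List.foldl_append]
  rw [foldl_lastpick_none p _ _ (by
    intro r hr
    rw [PySem.List.mem_pyRange_one] at hr
    exact h4 r (by omega) (by omega))]
  have : B + 1 = B + 1 := rfl
  rw [show PySem.List.pyRange a (B + 1) 1 = PySem.List.pyRange a B 1 ++ [B] from
    PySem.List.pyRange_one_succ_right h1, List.foldl_append]
  simp [h3]

theorem foldl_ge_init {α : Type} (step : Int → α → Int) (hm : ∀ b x, b ≤ step b x)
    (L : List α) (init : Int) : init ≤ L.foldl step init := by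
  induction L generalizing init with
  | nil => simp
  | cons x t ih => exact le_trans (hm init x) (ih _)

theorem foldl_ge_at {α : Type} (step : Int → α → Int) (hm : ∀ b x, b ≤ step b x)
    (L : List α) (init : Int) {z : α} (hz : z ∈ L) {v : Int} (hv : ∀ b, v ≤ step b z) :
    v ≤ L.foldl step init := by
  obtain ⟨L1, L2, rfl⟩ := List.append_of_mem hz
  rw [List.foldl_append, List.foldl_cons]
  exact le_trans (hv _) (foldl_ge_init step hm _ _)

theorem foldl_preserve' {α : Type} (P : Int → Prop) (step : Int → α → Int)
    (L : List α) (init : Int) (hi : P init) (h : ∀ b, ∀ x ∈ L, P b → P (step b x)) :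
    P (L.foldl step init) := by
  induction L generalizing init with
  | nil => simpa
  | cons x t ih =>
    exact ih _ (h init x (by simp) hi) (fun b y hy => h b y (by simp [hy]))


theorem mexA_nonneg (l : List Int) : 0 ≤ mexA l := (mexA_isMex l).1

theorem mexA_eq_zero (l : List Int) (h : (0 : Int) ∉ l) : mexA l = 0 := by
  rcases mexA_isMex l with ⟨ha, hb, hc⟩
  by_contra hne
  exact h (hc 0 le_rfl (by omega))

theorem mexA_pos (l : List Int) (h : (0 : Int) ∈ l) : 1 ≤ mexA l := by
  have h1 := mexA_isMex l
  rcases h1 with ⟨a, b, c⟩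
  by_contra hc
  have : mexA l = 0 := by omega
  exact b (this ▸ h)

-- positives helpers
theorem posf_append (l1 l2 : List Int) : posf (l1 ++ l2) = posf l1 ++ posf l2 := by
  simp [posf]

theorem posf_cons_zero (l : List Int) : posf (0 :: l) = posf l := by simp [posf]

theorem posf_cons_pos {y : Int} (hy : 0 < y) (l : List Int) : posf (y :: l) = y :: posf l := by
  simp [posf, hy]

theorem posf_cons_nonpos {y : Int} (hy : y ≤ 0) (l : List Int) : posf (y :: l) = posf l := by
  have hny : ¬ (0 < y) := by omega
  simp [posf, hny]

theorem posf_eq_self {l : List Int} (h : ∀ x ∈ l, 0 < x) : posf l = l :=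
  List.filter_eq_self.mpr (fun x hx => by simpa using h x hx)

theorem mem_posf_pos {l : List Int} {x : Int} (hx : x ∈ posf l) : 0 < x := by
  have := List.of_mem_filter hx; simpa using this

theorem posf_sublist (l : List Int) : (posf l).Sublist l := List.filter_sublist

theorem Mn_singleton (x : Int) : Mn [x] = x := by
  have := PySem.List.min?_id_cons (x := x) (t := ([] : List Int))
  simp [Mn, this]

theorem Mn_append_singleton (t : List Int) (ht : t ≠ []) (y : Int) :
    Mn (t ++ [y]) = min (Mn t) y := by
  obtain ⟨x, t', rfl⟩ := List.exists_cons_of_ne_nil ht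
  have h1 := PySem.List.min?_id_cons (x := x) (t := t')
  have h2 := PySem.List.min?_id_cons (x := x) (t := t' ++ [y])
  simp only [Mn, List.cons_append, h1, h2, Option.getD_some, List.foldl_append, List.foldl_cons,
    List.foldl_nil]

-- all positives, optionally ending in a single negative: always magical
theorem magical_posneg (t u : List Int) (ht : ∀ x ∈ t, 0 < x) (hu : ∀ x ∈ u, x < 0)
    (hu1 : u.length ≤ 1) : naiveIsMagical (t ++ u) = true := by
  rw [magical_iff]
  intro i h1 hl
  rw [not_lt]
  have hlen : (t ++ u).length = t.length + u.length := by simp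
  have hit : i ≤ t.length := by omega
  have htake : (t ++ u).take i = t.take i := List.take_append_of_le_length hit
  have h0r : (0 : Int) ∉ (t ++ u).drop i := by
    intro h0
    have := List.mem_of_mem_drop h0
    rcases List.mem_append.mp this with h | h
    · exact absurd (ht 0 h) (by omega)
    · exact absurd (hu 0 h) (by omega)
  rw [mexA_eq_zero _ h0r, htake]
  have hne : t.take i ≠ [] := by
    intro hcontra
    have hlen0 : (List.take i t).length = 0 := by rw [hcontra]; rfl
    rw [List.length_take] at hlen0
    omega
  apply Mn_ge _ hne
  intro x hx
  exact le_of_lt (ht x (List.mem_of_mem_take hx))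

-- every element before the last one is nonnegative
theorem magical_front_nonneg (t : List Int) (x : Int)
    (hm : naiveIsMagical (t ++ [x]) = true) : ∀ y ∈ t, 0 ≤ y := by
  intro y hy
  obtain ⟨i, hi, rfl⟩ := List.mem_iff_getElem.mp hy
  have hc := (magical_iff _).mp hm (i + 1) (by omega) (by simp; omega)
  rw [not_lt] at hc
  have htake : (t ++ [x]).take (i + 1) = t.take (i + 1) :=
    List.take_append_of_le_length (by omega)
  have hmem : t[i] ∈ (t ++ [x]).take (i + 1) := by
    rw [htake]
    have : (t.take (i + 1))[i]'(by simp; omega) = t[i] := List.getElem_take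
    exact this ▸ List.getElem_mem _
  have := Mn_le hmem
  have := mexA_nonneg ((t ++ [x]).drop (i + 1))
  omega

-- only one zero: anything right of a zero is nonzero
theorem magical_zero_unique (s1 s2 : List Int)
    (hm : naiveIsMagical (s1 ++ 0 :: s2) = true) : (0 : Int) ∉ s2 := by
  intro h0
  have hs2 : s2 ≠ [] := by rintro rfl; simp at h0
  have hl2 : 1 ≤ s2.length := by
    cases s2 with | nil => simp at h0 | cons a b => simp
  have hc := (magical_iff _).mp hm (s1.length + 1) (by omega) (by simp; omega)
  rw [not_lt] at hc
  have htake : (s1 ++ 0 :: s2).take (s1.length + 1) = s1 ++ [0] := by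
    rw [List.take_append]
    simp [List.take_of_length_le (le_of_lt (Nat.lt_succ_self _))]
  have hdrop : (s1 ++ 0 :: s2).drop (s1.length + 1) = s2 := by
    rw [List.drop_append]
    simp
  rw [htake, hdrop] at hc
  have h1 : Mn (s1 ++ [0]) ≤ 0 := Mn_le (by simp)
  have h2 := mexA_pos s2 h0
  omega

-- decompose a sublist ending in x
theorem sublist_concat_decomp : ∀ {l t : List Int} {x : Int}, (t ++ [x]).Sublist l →
    ∃ j : Nat, j < l.length ∧ l.getD j 0 = x ∧ t.Sublist (l.take j) := by
  intro l
  induction l with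
  | nil =>
    intro t x h
    have := h.length_le; simp at this
  | cons y l' ih =>
    intro t x h
    rcases List.sublist_cons_iff.mp h with h' | ⟨r, hr, hr'⟩
    · obtain ⟨j, hj1, hj2, hj3⟩ := ih h'
      exact ⟨j + 1, by simp; omega, by simpa using hj2, by
        simpa using List.Sublist.cons y hj3⟩
    · cases t with
      | nil =>
        simp at hr
        exact ⟨0, by simp, by simp [hr.1.symm], by simp⟩
      | cons c t' =>
        simp only [List.cons_append, List.cons.injEq] at hr
        obtain ⟨rfl, hreq⟩ := hr
        obtain ⟨j, hj1, hj2, hj3⟩ := ih (hreq ▸ hr')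
        refine ⟨j + 1, by simp; omega, by simpa using hj2, ?_⟩
        simpa using List.Sublist.cons₂ c hj3

-- a positive sublist realizing the full positive count is the positives list
theorem posf_full {s l : List Int} (hs : s.Sublist l) (hpos : ∀ x ∈ s, 0 < x)
    (hlen : (posf l).length ≤ s.length) : s = posf l := by
  have h1 : s.filter (fun x => decide (0 < x)) = s :=
    List.filter_eq_self.mpr (fun x hx => by simpa using hpos x hx)
  have h2 : s.Sublist (posf l) := by
    have := hs.filter (fun x => decide (0 < x))
    rwa [h1] at this
  exact List.Sublist.eq_of_length_le h2 hlen

-- rigidity: a sublist with one zero containing every positive is canonical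
theorem rigid : ∀ (l : List Int) (s1 s2 : List Int), (s1 ++ 0 :: s2).Sublist l →
    (∀ x ∈ s1, 0 < x) → (∀ x ∈ s2, 0 < x) →
    (posf l).length ≤ s1.length + s2.length →
    ∃ z : Nat, z < l.length ∧ l.getD z 0 = 0 ∧
      s1 = posf (l.take z) ∧ s2 = posf (l.drop (z + 1)) := by
  intro l
  induction l with
  | nil =>
    intro s1 s2 h _ _ _
    have := h.length_le; simp at this
  | cons y l' ih =>
    intro s1 s2 h hp1 hp2 hlen
    have hposu : posf (s1 ++ 0 :: s2) = s1 ++ s2 := by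
      rw [posf_append, posf_cons_zero, posf_eq_self hp1, posf_eq_self hp2]
    rcases List.sublist_cons_iff.mp h with h' | ⟨r, hr, hr'⟩
    · -- y skipped
      by_cases hy : 0 < y
      · exfalso
        have hcount : ((s1 ++ 0 :: s2).filter (fun x => decide (0 < x))).Sublist (posf l') :=
          h'.filter _
        have : (posf (s1 ++ 0 :: s2)).length ≤ (posf l').length := by
          exact List.Sublist.length_le hcount
        rw [hposu] at this
        have hple : (posf (y :: l')).length = (posf l').length + 1 := by
          rw [posf_cons_pos hy]; simp
        simp at this hlen
        omega
      · obtain ⟨z, hz1, hz2, hz3, hz4⟩ := ih s1 s2 h' hp1 hp2 (by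
          rw [posf_cons_nonpos (by omega)] at hlen; exact hlen)
        refine ⟨z + 1, by simp; omega, by simpa using hz2, ?_, by simpa using hz4⟩
        rw [List.take_succ_cons, posf_cons_nonpos (by omega)]
        exact hz3
    · -- y kept
      cases s1 with
      | nil =>
        simp only [List.nil_append, List.cons.injEq] at hr
        obtain ⟨hy0, rfl⟩ := hr
        refine ⟨0, by simp, by simp [hy0.symm], by simp [posf], ?_⟩
        simp only [List.drop_succ_cons, List.drop_zero]
        apply posf_full hr' hp2
        rw [← hy0] at hlen
        rw [posf_cons_zero] at hlen
        simpa using hlen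
      | cons c s1' =>
        simp only [List.cons_append, List.cons.injEq] at hr
        obtain ⟨rfl, hreq⟩ := hr
        have hc : 0 < c := hp1 c (by simp)
        obtain ⟨z, hz1, hz2, hz3, hz4⟩ := ih s1' s2 (hreq ▸ hr')
          (fun x hx => hp1 x (by simp [hx])) hp2 (by
            rw [posf_cons_pos hc] at hlen; simp at hlen ⊢; omega)
        refine ⟨z + 1, by simp; omega, by simpa using hz2, ?_, by simpa using hz4⟩
        rw [List.take_succ_cons, posf_cons_pos hc, hz3]

def zstep (p : List Int) (st : Option Int × Bool) (i : Int) : Option Int × Bool :=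
  let lo := match st.1 with
    | none => PySem.List.pyGetD p i 0
    | some lo => if PySem.List.pyGetD p i 0 < lo then PySem.List.pyGetD p i 0 else lo
  (some lo, st.2 && !decide (lo < mex2 (PySem.List.slice p (some (i + 1)) none ++ [0])))

theorem zeroOk_eq (pre : List Int) (z j : Int) :
    zeroOk pre z j =
      ((PySem.List.pyRange 0
          (((PySem.List.slice pre none (some z)).filter (fun x => decide (0 < x))).length : Int) 1).foldl
        (zstep ((PySem.List.slice pre none (some j)).filter (fun x => decide (0 < x))))
        (none, true)).2 := rfl

theorem take_one_of_lt {p : List Int} (h : 0 < p.length) : p.take 1 = [p[0]] := by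
  rw [List.take_succ]
  simp [List.getElem?_eq_getElem h]

theorem zfold_spec (p : List Int) : ∀ k : Nat, k ≤ p.length →
    (0 < k → ((PySem.List.pyRange 0 (k : Int) 1).foldl (zstep p) (none, true)).1
        = some (Mn (p.take k))) ∧
    (((PySem.List.pyRange 0 (k : Int) 1).foldl (zstep p) (none, true)).2 = true ↔
      ∀ i : Nat, i < k → ¬ (Mn (p.take (i + 1)) < mex2 (p.drop (i + 1) ++ [0]))) := by
  intro k
  induction k with
  | zero =>
    intro _
    rw [show ((0 : Nat) : Int) = 0 by rfl, PySem.List.pyRange_one_eq_nil le_rfl]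
    simp
  | succ k ih =>
    intro hk1
    have hk : k ≤ p.length := by omega
    have hklen : k < p.length := by omega
    obtain ⟨ih1, ih2⟩ := ih hk
    have hrange : PySem.List.pyRange 0 (((k + 1 : Nat)) : Int) 1
        = PySem.List.pyRange 0 (k : Int) 1 ++ [(k : Int)] := by
      push_cast
      exact PySem.List.pyRange_one_succ_right (by omega)
    rw [hrange, List.foldl_append, List.foldl_cons, List.foldl_nil]
    have hget : PySem.List.pyGetD p (k : Int) 0 = p[k] := by
      rw [PySem.List.pyGetD_natCast]
      exact List.getD_eq_getElem p 0 hklen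
    have hslice : PySem.List.slice p (some ((k : Int) + 1)) none = p.drop (k + 1) := by
      have ht : ((k : Int) + 1).toNat = k + 1 := by omega
      rw [PySem.List.slice_from p (by omega), ht]
    have hlo : ∀ st : Option Int × Bool,
        st.1 = (if 0 < k then some (Mn (p.take k)) else none) →
        (zstep p st (k : Int)).1 = some (Mn (p.take (k + 1))) ∧
        (zstep p st (k : Int)).2
          = (st.2 && !decide (Mn (p.take (k + 1)) < mex2 (p.drop (k + 1) ++ [0]))) := by
      intro st hst
      by_cases hk0 : 0 < k
      · rw [if_pos hk0] at hst
        have htk : p.take (k + 1) = p.take k ++ [p[k]] := (List.take_append_getElem hklen).symm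
        have htkne : p.take k ≠ [] := by
          intro hcontra
          have h0 : (List.take k p).length = 0 := by rw [hcontra]; rfl
          rw [List.length_take] at h0
          omega
        have hmn : Mn (p.take (k + 1)) = min (Mn (p.take k)) p[k] := by
          rw [htk, Mn_append_singleton _ htkne]
        simp only [zstep, hst, hget, hslice]
        constructor
        · congr 1
          rw [hmn]
          rcases le_or_gt (Mn (p.take k)) p[k] with h | h
          · rw [if_neg (by omega), min_eq_left h]
          · rw [if_pos h, min_eq_right (by omega)]
        · rw [hmn]
          congr 2
          rcases le_or_gt (Mn (p.take k)) p[k] with h | h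
          · rw [if_neg (by omega), min_eq_left h]
          · rw [if_pos h, min_eq_right (by omega)]
      · have hkz : k = 0 := by omega
        subst hkz
        rw [if_neg (by omega)] at hst
        have htk : p.take 1 = [p[0]] := take_one_of_lt (by omega)
        have hmn : Mn (p.take 1) = p[0] := by rw [htk, Mn_singleton]
        have hget0 : PySem.List.pyGetD p 0 0 = p[0] := by simpa using hget
        have hslice0 : PySem.List.slice p (some 1) none = p.tail := by
          simpa [List.drop_one] using hslice
        simp [zstep, hst, hmn, hget0, hslice0]
    by_cases hk0 : 0 < k
    · obtain ⟨c1, c2⟩ := hlo _ (by rw [if_pos hk0]; exact ih1 hk0)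
      refine ⟨fun _ => c1, ?_⟩
      rw [c2, Bool.and_eq_true, ih2]
      constructor
      · rintro ⟨hall, hlast⟩ i hi
        rcases Nat.lt_succ_iff_lt_or_eq.mp hi with h | h
        · exact hall i h
        · subst h; simpa using hlast
      · intro hall
        exact ⟨fun i hi => hall i (by omega), by simpa using hall k (by omega)⟩
    · have hkz : k = 0 := by omega
      subst hkz
      have hFnil : (PySem.List.pyRange 0 ((0 : Nat) : Int) 1).foldl (zstep p)
          ((none : Option Int), true) = (none, true) := by
        rw [show ((0 : Nat) : Int) = 0 from rfl, PySem.List.pyRange_one_eq_nil le_rfl]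
        rfl
      obtain ⟨c1, c2⟩ := hlo ((PySem.List.pyRange 0 ((0 : Nat) : Int) 1).foldl (zstep p)
          ((none : Option Int), true)) (by rw [hFnil, if_neg (by omega)])
      refine ⟨fun _ => c1, ?_⟩
      rw [c2]
      rw [show ((0:Nat):Int) = 0 by rfl, PySem.List.pyRange_one_eq_nil le_rfl]
      simp only [List.foldl_nil, Bool.true_and]
      constructor
      · intro hlast i hi
        have : i = 0 := by omega
        subst this
        simpa using hlast
      · intro hall
        simpa using hall 0 (by omega)

theorem zeroOk_iff (pre : List Int) (z j : Nat) (hzj : z < j) (hj : j ≤ pre.length)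
    (hz0 : pre.getD z 0 = 0) (tail : List Int) (htail : ∀ x ∈ tail, x < 0)
    (htl : tail.length ≤ 1) :
    (naiveIsMagical (czand pre z j ++ tail) = true) ↔ zeroOk pre (z : Int) (j : Int) = true := by
  have hzl : z < pre.length := by omega
  have hjl : (pre.take j).length = j := by rw [List.length_take]; omega
  have hzlt : z < (pre.take j).length := by omega
  have e3 : (pre.take j)[z]'hzlt = pre[z]'hzl := List.getElem_take
  have e4 : pre[z]'hzl = 0 := by rw [← List.getD_eq_getElem pre 0 hzl]; exact hz0
  have htj : pre.take j = pre.take z ++ 0 :: (pre.take j).drop (z + 1) := by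
    conv_lhs => rw [← List.take_append_drop z (pre.take j)]
    rw [List.take_take, Nat.min_eq_left (by omega), List.drop_eq_getElem_cons hzlt, e3, e4]
  have hsplit : posf (pre.take j)
      = posf (pre.take z) ++ posf ((pre.take j).drop (z + 1)) := by
    conv_lhs => rw [htj]
    rw [posf_append, posf_cons_zero]
  have hzk : zeroOk pre (z : Int) (j : Int)
      = ((PySem.List.pyRange 0 (((posf (pre.take z)).length : Nat) : Int) 1).foldl
          (zstep (posf (pre.take j))) (none, true)).2 := by
    rw [zeroOk_eq, PySem.List.slice_to_natCast, PySem.List.slice_to_natCast]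
    rfl
  have hklen : (posf (pre.take z)).length ≤ (posf (pre.take j)).length := by
    rw [hsplit]; simp
  have hzf := (zfold_spec (posf (pre.take j)) (posf (pre.take z)).length hklen).2
  -- abbreviations
  have hcand : czand pre z j ++ tail
      = (posf (pre.take z) ++ 0 :: posf ((pre.take j).drop (z + 1))) ++ tail := rfl
  have hlenA : (posf (pre.take z) ++ 0 :: posf ((pre.take j).drop (z + 1))).length
      = (posf (pre.take z)).length + 1 + (posf ((pre.take j).drop (z + 1))).length := by
    simp; omega
  have key1 : ∀ i : Nat, i < (posf (pre.take z)).length →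
      (czand pre z j ++ tail).take (i + 1) = (posf (pre.take j)).take (i + 1) := by
    intro i hi
    rw [hcand, List.take_append_of_le_length (by rw [hlenA]; omega),
      List.take_append_of_le_length (by omega), hsplit,
      List.take_append_of_le_length (by omega)]
  have key2 : ∀ i : Nat, i < (posf (pre.take z)).length →
      mexA ((czand pre z j ++ tail).drop (i + 1))
        = mex2 ((posf (pre.take j)).drop (i + 1) ++ [0]) := by
    intro i hi
    have hdr : (czand pre z j ++ tail).drop (i + 1)
        = (posf (pre.take z)).drop (i + 1)
            ++ 0 :: posf ((pre.take j).drop (z + 1)) ++ tail := by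
      rw [hcand, List.drop_append_of_le_length (by rw [hlenA]; omega),
        List.drop_append_of_le_length (by omega), List.append_assoc]
    have hpd : (posf (pre.take j)).drop (i + 1)
        = (posf (pre.take z)).drop (i + 1) ++ posf ((pre.take j).drop (z + 1)) := by
      rw [hsplit, List.drop_append_of_le_length (by omega)]
    have hmemiff : ∀ t : Int, 0 ≤ t →
        (t ∈ (posf (pre.take j)).drop (i + 1) ++ [0]
          ↔ t ∈ (czand pre z j ++ tail).drop (i + 1)) := by
      intro t ht
      rw [hdr, hpd]
      simp only [List.mem_append, List.mem_cons, List.not_mem_nil, or_false]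
      constructor
      · rintro ((h | h) | h)
        · exact Or.inl (Or.inl h)
        · exact Or.inl (Or.inr (Or.inr h))
        · exact Or.inl (Or.inr (Or.inl h))
      · rintro ((h | h | h) | h)
        · exact Or.inl (Or.inl h)
        · exact Or.inr h
        · exact Or.inl (Or.inr h)
        · exact absurd (htail t h) (by omega)
    exact isMex_unique (mexA_isMex _) (isMex_congr hmemiff (mex2_isMex _))
  have key3 : ∀ i' : Nat, (posf (pre.take z)).length < i' → i' < (czand pre z j ++ tail).length →
      ¬ (Mn ((czand pre z j ++ tail).take i') < mexA ((czand pre z j ++ tail).drop i')) := by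
    intro i' hgt hlt
    have hclen : (czand pre z j ++ tail).length
        = (posf (pre.take z)).length + 1 + (posf ((pre.take j).drop (z + 1))).length
          + tail.length := by
      rw [hcand]; simp; omega
    have h0r : (0 : Int) ∉ (czand pre z j ++ tail).drop i' := by
      intro h0
      rw [hcand, List.drop_append] at h0
      rcases List.mem_append.mp h0 with h | h
      · rw [List.drop_append, List.drop_eq_nil_of_le (by omega), List.nil_append] at h
        obtain ⟨m, hm⟩ : ∃ m, i' - (posf (pre.take z)).length = m + 1 :=
          ⟨i' - (posf (pre.take z)).length - 1, by omega⟩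
        rw [hm, List.drop_succ_cons] at h
        exact absurd (mem_posf_pos (List.mem_of_mem_drop h)) (by omega)
      · exact absurd (htail 0 (List.mem_of_mem_drop h)) (by omega)
    rw [not_lt, mexA_eq_zero _ h0r]
    have htake : (czand pre z j ++ tail).take i' = (czand pre z j).take i' :=
      List.take_append_of_le_length (by
        have : (czand pre z j).length
            = (posf (pre.take z)).length + 1 + (posf ((pre.take j).drop (z + 1))).length := by
          unfold czand; simp; omega
        have hclen2 := hclen
        omega)
    have hne : (czand pre z j ++ tail).take i' ≠ [] := by
      intro hcontra
      have h0' : ((czand pre z j ++ tail).take i').length = 0 := by rw [hcontra]; rfl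
      rw [List.length_take] at h0'
      omega
    apply Mn_ge _ hne
    intro x hx
    rw [htake] at hx
    have := List.mem_of_mem_take hx
    unfold czand at this
    rcases List.mem_append.mp this with h | h
    · exact le_of_lt (mem_posf_pos h)
    · rcases List.mem_cons.mp h with h | h
      · omega
      · exact le_of_lt (mem_posf_pos h)
  rw [hzk, hzf, magical_iff]
  constructor
  · intro hm i hi
    have hlen : i + 1 < (czand pre z j ++ tail).length := by
      rw [hcand]; simp; omega
    have := hm (i + 1) (by omega) hlen
    rwa [key1 i hi, key2 i hi] at this
  · intro hz' i' h1 h2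
    by_cases hle : i' ≤ (posf (pre.take z)).length
    · obtain ⟨i, rfl⟩ : ∃ i, i' = i + 1 := ⟨i' - 1, by omega⟩
      have hi : i < (posf (pre.take z)).length := by omega
      rw [key1 i hi, key2 i hi]
      exact hz' i hi
    · exact key3 i' (by omega) h2

theorem classify (pre s : List Int) (hs : s.Sublist pre)
    (hm : naiveIsMagical s = true) :
    ((s.length : Int) ≤ ((posf pre).length : Int)) ∨
    (∃ j : Nat, j < pre.length ∧ pre.getD j 0 < 0 ∧
      (s.length : Int) ≤ ((posf (pre.take j)).length : Int) + 1) ∨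
    (∃ z : Nat, z < pre.length ∧ pre.getD z 0 = 0 ∧
      zeroOk pre (z : Int) (pre.length : Int) = true ∧
      (s.length : Int) = ((posf pre).length : Int) + 1) ∨
    (∃ z j : Nat, z < j ∧ j < pre.length ∧ pre.getD z 0 = 0 ∧ pre.getD j 0 < 0 ∧
      zeroOk pre (z : Int) (j : Int) = true ∧
      (s.length : Int) = ((posf (pre.take j)).length : Int) + 2) := by
  rcases List.eq_nil_or_concat' s with rfl | ⟨t, x, rfl⟩
  · left; simp
  · have hfront := magical_front_nonneg t x hm
    by_cases hxneg : x < 0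
    · obtain ⟨j, hj1, hj2, hj3⟩ := sublist_concat_decomp hs
      by_cases h0t : (0 : Int) ∈ t
      · obtain ⟨s1, s2, rfl, h0s1⟩ := List.eq_append_cons_of_mem h0t
        have hm2 : naiveIsMagical (s1 ++ 0 :: (s2 ++ [x])) = true := by
          simpa [List.append_assoc] using hm
        have h0s2x : (0 : Int) ∉ s2 ++ [x] := magical_zero_unique s1 (s2 ++ [x]) hm2
        have hp1 : ∀ y ∈ s1, 0 < y := by
          intro y hy
          have h1 := hfront y (by simp [hy])
          have h2 : y ≠ 0 := fun h => h0s1 (h ▸ hy)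
          omega
        have hp2 : ∀ y ∈ s2, 0 < y := by
          intro y hy
          have h1 := hfront y (by simp [hy])
          have h2 : y ≠ 0 := fun h => h0s2x (by simp [h ▸ hy])
          omega
        have hposeq : posf (s1 ++ 0 :: s2) = s1 ++ s2 := by
          rw [posf_append, posf_cons_zero, posf_eq_self hp1, posf_eq_self hp2]
        have hposle : s1.length + s2.length ≤ (posf (pre.take j)).length := by
          have h1 := (hj3.filter (fun x => decide (0 < x))).length_le
          rw [show List.filter (fun x => decide (0 < x)) (s1 ++ 0 :: s2)
              = posf (s1 ++ 0 :: s2) from rfl, hposeq] at h1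
          simpa using h1
        by_cases heq : (posf (pre.take j)).length ≤ s1.length + s2.length
        · obtain ⟨z, hz1, hz2, hz3, hz4⟩ := rigid (pre.take j) s1 s2 hj3 hp1 hp2 heq
          have hjlen : (pre.take j).length = j := by rw [List.length_take]; omega
          have hzj : z < j := by omega
          have hzpre : z < pre.length := by omega
          have hz2' : pre.getD z 0 = 0 := by
            rw [List.getD_eq_getElem _ 0 (show z < (pre.take j).length by omega)] at hz2
            rw [List.getD_eq_getElem _ 0 hzpre]
            rw [List.getElem_take] at hz2
            exact hz2
          have e : (pre.take j).take z = pre.take z := by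
            rw [List.take_take, Nat.min_eq_left (by omega)]
          have hczand : s1 ++ 0 :: s2 = czand pre z j := by
            unfold czand
            rw [hz3, hz4, e]
          have hzok : zeroOk pre (z : Int) (j : Int) = true := by
            rw [← zeroOk_iff pre z j hzj (by omega) hz2' [x]
              (by intro y hy; simp at hy; omega) (by simp)]
            rw [← hczand]
            exact hm
          right; right; right
          refine ⟨z, j, hzj, hj1, hz2', by rw [hj2]; exact hxneg, hzok, ?_⟩
          have hpeq : (posf (pre.take j)).length = s1.length + s2.length := le_antisymm heq hposle
          simp [hpeq]
          push_cast
          omega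
        · right; left
          refine ⟨j, hj1, by rw [hj2]; exact hxneg, ?_⟩
          simp
          push_cast
          omega
      · have hp : ∀ y ∈ t, 0 < y := by
          intro y hy
          have h1 := hfront y hy
          have h2 : y ≠ 0 := fun h => h0t (h ▸ hy)
          omega
        right; left
        refine ⟨j, hj1, by rw [hj2]; exact hxneg, ?_⟩
        have hlen : t.length ≤ (posf (pre.take j)).length := by
          have h1 := (hj3.filter (fun x => decide (0 < x))).length_le
          rw [show List.filter (fun x => decide (0 < x)) t = posf t from rfl,
            posf_eq_self hp] at h1
          exact h1
        simp
        push_cast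
        omega
    · by_cases h0s : (0 : Int) ∈ t ++ [x]
      · obtain ⟨s1, s2, heq, h0s1⟩ := List.eq_append_cons_of_mem h0s
        have hm' : naiveIsMagical (s1 ++ 0 :: s2) = true := heq ▸ hm
        have h0s2 : (0 : Int) ∉ s2 := magical_zero_unique s1 s2 hm'
        have hsub' : (s1 ++ 0 :: s2).Sublist pre := heq ▸ hs
        have hallnn : ∀ y ∈ s1 ++ 0 :: s2, 0 ≤ y := by
          rw [← heq]
          intro y hy
          rcases List.mem_append.mp hy with h | h
          · exact hfront y h
          · simp at h; omega
        have hp1 : ∀ y ∈ s1, 0 < y := by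
          intro y hy
          have h1 := hallnn y (by simp [hy])
          have h2 : y ≠ 0 := fun h => h0s1 (h ▸ hy)
          omega
        have hp2 : ∀ y ∈ s2, 0 < y := by
          intro y hy
          have h1 := hallnn y (by simp [hy])
          have h2 : y ≠ 0 := fun h => h0s2 (h ▸ hy)
          omega
        have hposeq : posf (s1 ++ 0 :: s2) = s1 ++ s2 := by
          rw [posf_append, posf_cons_zero, posf_eq_self hp1, posf_eq_self hp2]
        have hposle : s1.length + s2.length ≤ (posf pre).length := by
          have h1 := (hsub'.filter (fun x => decide (0 < x))).length_le
          rw [show List.filter (fun x => decide (0 < x)) (s1 ++ 0 :: s2)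
              = posf (s1 ++ 0 :: s2) from rfl, hposeq] at h1
          simpa using h1
        have hslen : t.length = s1.length + s2.length := by
          have := congrArg List.length heq
          simp at this
          omega
        by_cases hfull : (posf pre).length ≤ s1.length + s2.length
        · obtain ⟨z, hz1, hz2, hz3, hz4⟩ := rigid pre s1 s2 hsub' hp1 hp2 hfull
          have hczand : s1 ++ 0 :: s2 = czand pre z pre.length := by
            unfold czand
            rw [List.take_length]
            rw [hz3, hz4]
          have hzok : zeroOk pre (z : Int) (pre.length : Int) = true := by
            rw [← zeroOk_iff pre z pre.length hz1 le_rfl hz2 [] (by simp) (by simp)]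
            rw [List.append_nil, ← hczand]
            exact hm'
          right; right; left
          refine ⟨z, hz1, hz2, hzok, ?_⟩
          have hpeq : (posf pre).length = s1.length + s2.length := le_antisymm hfull hposle
          simp only [List.length_append, List.length_cons, List.length_nil]
          push_cast
          omega
        · left
          simp only [List.length_append, List.length_cons, List.length_nil]
          push_cast
          omega
      · have hp : ∀ y ∈ t ++ [x], 0 < y := by
          intro y hy
          have h2 : y ≠ 0 := fun h => h0s (h ▸ hy)
          rcases List.mem_append.mp hy with h | h
          · have := hfront y h; omega
          · simp at h; omega
        left
        have h1 := (hs.filter (fun x => decide (0 < x))).length_le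
        rw [show List.filter (fun x => decide (0 < x)) (t ++ [x]) = posf (t ++ [x]) from rfl,
          posf_eq_self hp] at h1
        have h1' : (t ++ [x]).length ≤ (posf pre).length := h1
        push_cast
        omega

def Bcore (pre : List Int) : Int :=
  let P : Int := ((pre.filter (fun x => decide (0 < x))).length : Int)
  let best := P
  let best := (PySem.List.pyRange 0 (pre.length : Int) 1).foldl (fun best j =>
      if PySem.List.pyGetD pre j 0 < 0 then
        let b := (((PySem.List.slice pre none (some j)).filter (fun x => decide (0 < x))).length : Int) + 1
        if b > best then b else best
      else best) best
  (PySem.List.pyRange 0 (pre.length : Int) 1).foldl (fun best z =>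
      if PySem.List.pyGetD pre z 0 = 0 then
        let best := if zeroOk pre z (pre.length : Int) && decide (P + 1 > best) then P + 1 else best
        (PySem.List.pyRange (z + 1) (pre.length : Int) 1).foldl (fun best j =>
            if PySem.List.pyGetD pre j 0 < 0 && zeroOk pre z j then
              let b := (((PySem.List.slice pre none (some j)).filter (fun x => decide (0 < x))).length : Int) + 2
              if b > best then b else best
            else best) best
      else best) best

theorem naive_alt_eq (n : Int) (a : List Int) :
    naive_alt n a = Bcore (if 0 < n then PySem.List.slice a none (some n) else []) := rfl

-- Bcore lower bounds
theorem mono1 (pre : List Int) : ∀ (b : Int) (j : Int), b ≤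
    (if PySem.List.pyGetD pre j 0 < 0 then
        let v := (((PySem.List.slice pre none (some j)).filter (fun x => decide (0 < x))).length : Int) + 1
        if v > b then v else b
      else b) := by
  intro b j
  simp only [gt_iff_lt]
  split_ifs <;> omega

theorem mono2 (pre : List Int) (P : Int) : ∀ (b : Int) (z : Int), b ≤
    (if PySem.List.pyGetD pre z 0 = 0 then
        let b1 := if zeroOk pre z (pre.length : Int) && decide (P + 1 > b) then P + 1 else b
        (PySem.List.pyRange (z + 1) (pre.length : Int) 1).foldl (fun best j =>
            if PySem.List.pyGetD pre j 0 < 0 && zeroOk pre z j then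
              let v := (((PySem.List.slice pre none (some j)).filter (fun x => decide (0 < x))).length : Int) + 2
              if v > best then v else best
            else best) b1
      else b) := by
  intro b z
  split_ifs with h1 h2
  · refine le_trans ?_ (foldl_ge_init _ (fun b' j => by simp only [gt_iff_lt]; split_ifs <;> omega) _ _)
    rcases (Bool.and_eq_true _ _).mp h2 with ⟨_, hd⟩
    simp at hd
    omega
  · exact foldl_ge_init _ (fun b' j => by simp only [gt_iff_lt]; split_ifs <;> omega) _ _
  · exact le_rfl

theorem Bcore_ge_P (pre : List Int) : ((posf pre).length : Int) ≤ Bcore pre := by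
  unfold Bcore
  exact le_trans (foldl_ge_init _ (mono1 pre) _ _) (foldl_ge_init _ (mono2 pre _) _ _)

theorem Bcore_ge_neg (pre : List Int) (j : Nat) (hj : j < pre.length)
    (hneg : pre.getD j 0 < 0) :
    ((posf (pre.take j)).length : Int) + 1 ≤ Bcore pre := by
  unfold posf
  unfold Bcore
  refine le_trans (foldl_ge_at _ (mono1 pre) _ _ (z := (j : Int))
    (by rw [PySem.List.mem_pyRange_one]; omega) ?_) (foldl_ge_init _ (mono2 pre _) _ _)
  intro b
  have hget : PySem.List.pyGetD pre (j : Int) 0 = pre.getD j 0 := PySem.List.pyGetD_natCast pre _ 0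
  have hsl : PySem.List.slice pre none (some (j : Int)) = pre.take j :=
    PySem.List.slice_to_natCast pre _
  rw [if_pos (by rw [hget]; exact hneg)]
  simp only [gt_iff_lt, hsl]
  split_ifs <;> omega

theorem Bcore_ge_zero (pre : List Int) (z : Nat) (hz : z < pre.length)
    (hz0 : pre.getD z 0 = 0)
    (hzok : zeroOk pre (z : Int) (pre.length : Int) = true) :
    ((posf pre).length : Int) + 1 ≤ Bcore pre := by
  unfold posf
  unfold Bcore
  refine foldl_ge_at _ (mono2 pre _) _ _ (z := (z : Int))
    (by rw [PySem.List.mem_pyRange_one]; omega) ?_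
  intro b
  have hget : PySem.List.pyGetD pre (z : Int) 0 = pre.getD z 0 := PySem.List.pyGetD_natCast pre _ 0
  rw [if_pos (by rw [hget]; exact hz0)]
  refine le_trans ?_ (foldl_ge_init _
    (fun b' j => by simp only [gt_iff_lt]; split_ifs <;> omega) _ _)
  simp only [hzok, Bool.true_and]
  split_ifs with h
  · exact le_rfl
  · simp at h
    omega

theorem Bcore_ge_pair (pre : List Int) (z j : Nat) (hzj : z < j) (hj : j < pre.length)
    (hz0 : pre.getD z 0 = 0) (hneg : pre.getD j 0 < 0)
    (hzok : zeroOk pre (z : Int) (j : Int) = true) :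
    ((posf (pre.take j)).length : Int) + 2 ≤ Bcore pre := by
  unfold posf
  unfold Bcore
  refine foldl_ge_at _ (mono2 pre _) _ _ (z := (z : Int))
    (by rw [PySem.List.mem_pyRange_one]; omega) ?_
  intro b
  have hgetz : PySem.List.pyGetD pre (z : Int) 0 = pre.getD z 0 := PySem.List.pyGetD_natCast pre _ 0
  rw [if_pos (by rw [hgetz]; exact hz0)]
  refine foldl_ge_at _ (fun b' j' => by simp only [gt_iff_lt]; split_ifs <;> omega) _ _
    (z := (j : Int)) (by rw [PySem.List.mem_pyRange_one]; omega) ?_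
  intro b'
  have hgetj : PySem.List.pyGetD pre (j : Int) 0 = pre.getD j 0 := PySem.List.pyGetD_natCast pre _ 0
  have hsl : PySem.List.slice pre none (some (j : Int)) = pre.take j :=
    PySem.List.slice_to_natCast pre _
  rw [if_pos (by
    rw [hgetj, hzok]
    have : pre.getD j 0 = pre[j]?.getD 0 := by
      rw [List.getD_eq_getElem _ 0 hj, List.getElem?_eq_getElem hj]
      rfl
    simp only [Bool.and_true, decide_eq_true_eq]
    omega)]
  simp only [gt_iff_lt, hsl]
  split_ifs <;> omega

theorem hsplit_lemma (pre : List Int) (z j : Nat) (hzj : z < j) (hj : j ≤ pre.length)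
    (hz0 : pre.getD z 0 = 0) :
    posf (pre.take j) = posf (pre.take z) ++ posf ((pre.take j).drop (z + 1)) := by
  have hzl : z < pre.length := by omega
  have hjl : (pre.take j).length = j := by rw [List.length_take]; omega
  have hzlt : z < (pre.take j).length := by omega
  have e3 : (pre.take j)[z]'hzlt = pre[z]'hzl := List.getElem_take
  have e4 : pre[z]'hzl = 0 := by rw [← List.getD_eq_getElem pre 0 hzl]; exact hz0
  conv_lhs => rw [← List.take_append_drop z (pre.take j)]
  rw [List.take_take, Nat.min_eq_left (by omega), List.drop_eq_getElem_cons hzlt, e3, e4,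
    posf_append, posf_cons_zero]

theorem Ex_P (pre : List Int) : Ex pre ((posf pre).length : Int) := by
  refine ⟨posf pre, posf_sublist pre, ?_, rfl⟩
  have := magical_posneg (posf pre) [] (fun x hx => mem_posf_pos hx) (by simp) (by simp)
  rwa [List.append_nil] at this

theorem Ex_neg (pre : List Int) (j : Nat) (hj : j < pre.length)
    (hneg : pre.getD j 0 < 0) :
    Ex pre (((posf (pre.take j)).length : Int) + 1) := by
  have hgj : pre[j]'hj < 0 := by rw [← List.getD_eq_getElem pre 0 hj]; exact hneg
  refine ⟨posf (pre.take j) ++ [pre[j]'hj], ?_, ?_, by push_cast [List.length_append, List.length_cons, List.length_nil]; ring⟩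
  · conv_rhs => rw [← List.take_append_drop j pre]
    refine List.Sublist.append (posf_sublist _) ?_
    rw [List.drop_eq_getElem_cons hj]
    exact (List.nil_sublist _).cons₂ _
  · apply magical_posneg
    · exact fun x hx => mem_posf_pos hx
    · intro x hx
      simp at hx
      omega
    · simp

theorem Ex_zero (pre : List Int) (z : Nat) (hz : z < pre.length)
    (hz0 : pre.getD z 0 = 0)
    (hzok : zeroOk pre (z : Int) (pre.length : Int) = true) :
    Ex pre (((posf pre).length : Int) + 1) := by
  have hgz : pre[z]'hz = 0 := by rw [← List.getD_eq_getElem pre 0 hz]; exact hz0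
  have hmag : naiveIsMagical (czand pre z pre.length ++ []) = true :=
    (zeroOk_iff pre z pre.length hz le_rfl hz0 [] (by simp) (by simp)).mpr hzok
  rw [List.append_nil] at hmag
  have hp : posf pre = posf (pre.take z) ++ posf (pre.drop (z + 1)) := by
    conv_lhs => rw [← List.take_append_drop z pre, List.drop_eq_getElem_cons hz, hgz]
    rw [posf_append, posf_cons_zero]
  refine ⟨czand pre z pre.length, ?_, hmag, ?_⟩
  · unfold czand
    rw [List.take_length]
    conv_rhs => rw [← List.take_append_drop z pre, List.drop_eq_getElem_cons hz, hgz]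
    exact List.Sublist.append (posf_sublist _) (List.Sublist.cons₂ _ (posf_sublist _))
  · unfold czand
    rw [List.take_length, hp]
    push_cast [List.length_append, List.length_cons]
    ring

theorem Ex_pair (pre : List Int) (z j : Nat) (hzj : z < j) (hj : j < pre.length)
    (hz0 : pre.getD z 0 = 0) (hneg : pre.getD j 0 < 0)
    (hzok : zeroOk pre (z : Int) (j : Int) = true) :
    Ex pre (((posf (pre.take j)).length : Int) + 2) := by
  have hz : z < pre.length := by omega
  have hgz : pre[z]'hz = 0 := by rw [← List.getD_eq_getElem pre 0 hz]; exact hz0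
  have hgj : pre[j]'hj < 0 := by rw [← List.getD_eq_getElem pre 0 hj]; exact hneg
  have hmag : naiveIsMagical (czand pre z j ++ [pre[j]'hj]) = true :=
    (zeroOk_iff pre z j hzj (le_of_lt hj) hz0 [pre[j]'hj]
      (by intro y hy; simp at hy; omega) (by simp)).mpr hzok
  refine ⟨czand pre z j ++ [pre[j]'hj], ?_, hmag, ?_⟩
  · unfold czand
    rw [List.append_assoc, List.cons_append]
    conv_rhs => rw [← List.take_append_drop z pre, List.drop_eq_getElem_cons hz, hgz]
    refine List.Sublist.append (posf_sublist _) ?_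
    refine List.Sublist.cons₂ _ ?_
    have hdec : pre.drop (z + 1) = (pre.take j).drop (z + 1) ++ pre.drop j := by
      conv_lhs => rw [← List.take_append_drop j pre]
      rw [List.drop_append_of_le_length (by rw [List.length_take]; omega)]
    rw [hdec]
    refine List.Sublist.append (posf_sublist _) ?_
    rw [List.drop_eq_getElem_cons hj]
    exact (List.nil_sublist _).cons₂ _
  · have hs := hsplit_lemma pre z j hzj (le_of_lt hj) hz0
    rw [hs]
    unfold czand
    push_cast [List.length_append, List.length_cons, List.length_nil]
    ring

theorem Bcore_Ex (pre : List Int) : Ex pre (Bcore pre) := by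
  unfold Bcore
  refine foldl_preserve' (Ex pre) _ _ _ (foldl_preserve' (Ex pre) _ _ _ (Ex_P pre) ?_) ?_
  · intro b x hx hb
    rw [PySem.List.mem_pyRange_one] at hx
    by_cases hc : PySem.List.pyGetD pre x 0 < 0
    · rw [if_pos hc]
      simp only [gt_iff_lt]
      split_ifs with h
      · have hx0 : 0 ≤ x := hx.1
        have hxl : x.toNat < pre.length := by omega
        have hxx : x = ((x.toNat : Nat) : Int) := by omega
        have hget : PySem.List.pyGetD pre x 0 = pre.getD x.toNat 0 := by
          rw [hxx]; exact PySem.List.pyGetD_natCast pre _ 0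
        have hsl : PySem.List.slice pre none (some x) = pre.take x.toNat :=
          PySem.List.slice_to pre hx0
        rw [hsl]
        have := Ex_neg pre x.toNat hxl (by rw [← hget]; exact hc)
        unfold posf at this
        exact this
      · exact hb
    · rw [if_neg hc]; exact hb
  · intro b x hx hb
    rw [PySem.List.mem_pyRange_one] at hx
    have hx0 : 0 ≤ x := hx.1
    have hxl : x.toNat < pre.length := by omega
    have hxx : x = ((x.toNat : Nat) : Int) := by omega
    by_cases hc : PySem.List.pyGetD pre x 0 = 0
    · rw [if_pos hc]
      have hget : PySem.List.pyGetD pre x 0 = pre.getD x.toNat 0 := by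
        rw [hxx]; exact PySem.List.pyGetD_natCast pre _ 0
      refine foldl_preserve' (Ex pre) _ _ _ ?_ ?_
      · split_ifs with h
        · rcases (Bool.and_eq_true _ _).mp h with ⟨hzk, _⟩
          have := Ex_zero pre x.toNat hxl (by rw [← hget]; exact hc)
            (by rw [← hxx]; exact hzk)
          unfold posf at this
          exact this
        · exact hb
      · intro b' y hy hb'
        rw [PySem.List.mem_pyRange_one] at hy
        by_cases hc2 : (decide (PySem.List.pyGetD pre y 0 < 0) && zeroOk pre x y) = true
        · rw [if_pos hc2]
          simp only [gt_iff_lt]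
          split_ifs with h2
          · rcases (Bool.and_eq_true _ _).mp hc2 with ⟨hneg', hzk'⟩
            have hy0 : 0 ≤ y := by omega
            have hyl : y.toNat < pre.length := by omega
            have hyy : y = ((y.toNat : Nat) : Int) := by omega
            have hgety : PySem.List.pyGetD pre y 0 = pre.getD y.toNat 0 := by
              rw [hyy]; exact PySem.List.pyGetD_natCast pre _ 0
            have hsl : PySem.List.slice pre none (some y) = pre.take y.toNat :=
              PySem.List.slice_to pre hy0
            rw [hsl]
            have := Ex_pair pre x.toNat y.toNat (by omega) hyl
              (by rw [← hget]; exact hc)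
              (by rw [← hgety]; simpa using hneg')
              (by rw [← hxx, ← hyy]; exact hzk')
            unfold posf at this
            exact this
          · exact hb'
        · rw [if_neg hc2]; exact hb'
    · rw [if_neg hc]; exact hb

theorem main_theorem (n : Int) (a : List Int) (hpre : n ≤ (a.length : Int)) :
    naive n a = naive_alt n a := by
  rw [naive_alt_eq]
  by_cases hn : 0 < n
  · rw [if_pos hn, PySem.List.slice_to a (le_of_lt hn)]
    have hprelen : (a.take n.toNat).length = n.toNat := by
      rw [List.length_take]; omega
    unfold naive
    have hiff : ∀ r : Int, 1 ≤ r →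
        (((PySem.List.combinations (PySem.List.pyRange 0 n 1) r.toNat).any
          (fun comb => naiveIsMagical (comb.map (fun i => PySem.List.pyGetD a i 0)))) = true
          ↔ Ex (a.take n.toNat) r) := fun r hr => any_comb a n r (by omega) hpre hr
    have hEx := Bcore_Ex (a.take n.toNat)
    have hub : ∀ r : Int, Ex (a.take n.toNat) r → r ≤ Bcore (a.take n.toNat) := by
      rintro r ⟨s, hs, hmag, rfl⟩
      rcases classify (a.take n.toNat) s hs hmag with h | ⟨j, hj1, hj2, hj3⟩ |
        ⟨z, hz1, hz2, hz3, hz4⟩ | ⟨z, j, hzj, hj1, hz2, hj2, hzok, hlen⟩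
      · exact le_trans h (Bcore_ge_P _)
      · exact le_trans hj3 (Bcore_ge_neg _ j hj1 hj2)
      · rw [hz4]; exact Bcore_ge_zero _ z hz1 hz2 hz3
      · rw [hlen]; exact Bcore_ge_pair _ z j hzj hj1 hz2 hj2 hzok
    by_cases hB : 1 ≤ Bcore (a.take n.toNat)
    · have hBn : Bcore (a.take n.toNat) < n + 1 := by
        obtain ⟨s, hs, _, hlen⟩ := hEx
        have h1 := hs.length_le
        omega
      refine foldl_lastpick _ 1 (n + 1) (Bcore (a.take n.toNat)) 0 hB hBn ?_ ?_
      · exact (hiff _ hB).mpr hEx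
      · intro r h1 h2
        by_cases hc : ((PySem.List.combinations (PySem.List.pyRange 0 n 1) r.toNat).any
            (fun comb => naiveIsMagical (comb.map (fun i => PySem.List.pyGetD a i 0)))) = true
        · exact absurd (hub r ((hiff r (by omega)).mp hc)) (by omega)
        · exact Bool.eq_false_iff.mpr hc
    · have hgeP := Bcore_ge_P (a.take n.toNat)
      have hB0 : Bcore (a.take n.toNat) = 0 := by
        have : (0 : Int) ≤ ((posf (a.take n.toNat)).length : Int) := by positivity
        omega
      rw [hB0]
      apply foldl_lastpick_none
      intro r hr
      rw [PySem.List.mem_pyRange_one] at hr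
      by_cases hc : ((PySem.List.combinations (PySem.List.pyRange 0 n 1) r.toNat).any
          (fun comb => naiveIsMagical (comb.map (fun i => PySem.List.pyGetD a i 0)))) = true
      · exfalso
        have := hub r ((hiff r (by omega)).mp hc)
        omega
      · exact Bool.eq_false_iff.mpr hc
  · rw [if_neg hn]
    unfold naive
    rw [PySem.List.pyRange_one_eq_nil (show n + 1 ≤ 1 by omega)]
    simp only [List.foldl_nil]
    decide

-- ===== VERDICT (by name: the statement is the Claim_ definition above) =====
theorem naive_spec : Claim_equal_naive := by
  intro n a _ hpre
  unfold Spec_naive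
  exact main_theorem n a hpre
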